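-- pv_equiv track=rewrite | github.com/SevvalEnsarioglu/algoritmalar | brute-force/calisma-1.py | deneme1
-- ===== SOURCE A (Python) =====
-- def deneme1(A):
--     count=0
--     for i in range(len(A)):
--         if(A[i]==1):
--             for j in range(i+1, len(A)):
--                 if(A[j] == 9):
--                     count+=1
--     return count
-- ===== SOURCE B (Python) =====
-- def deneme1(A):
--     ones = 0
--     count = 0
--     for x in A:
--         if x == 9:
--             count += ones
--         if x == 1:
--             ones += 1
--     return count
-- ===== Notes on version B (the rewrite author's own statement) =====
-- stated objective: alternative
-- what changed: Replaced the nested index loops (for each 1, scan the suffix for 9s) by a single left-to-right pass that keeps a running count of 1s seen and adds it whenever a 9 appears.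
import Mathlib
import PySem

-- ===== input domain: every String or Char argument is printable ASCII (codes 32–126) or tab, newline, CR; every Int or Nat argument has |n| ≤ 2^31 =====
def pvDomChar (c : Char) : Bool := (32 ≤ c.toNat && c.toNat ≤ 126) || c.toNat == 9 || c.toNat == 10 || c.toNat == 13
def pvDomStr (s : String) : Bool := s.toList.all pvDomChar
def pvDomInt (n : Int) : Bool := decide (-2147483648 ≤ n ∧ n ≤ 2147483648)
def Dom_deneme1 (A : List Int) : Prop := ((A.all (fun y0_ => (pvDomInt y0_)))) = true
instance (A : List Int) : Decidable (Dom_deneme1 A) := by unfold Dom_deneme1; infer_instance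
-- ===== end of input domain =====

-- B replaces A's nested index loops by one pass counting 1s seen so far and adding on each 9.


-- ===== PORT A =====
-- for i in range(len(A)): if A[i]==1: for j in range(i+1,len(A)): if A[j]==9: count+=1
def deneme1 (A : List Int) : Int :=
  (PySem.List.pyRange 0 (A.length : Int) 1).foldl
    (fun count i =>
      if PySem.List.pyGetD A i 0 = 1 then
        (PySem.List.pyRange (i + 1) (A.length : Int) 1).foldl
          (fun c j => if PySem.List.pyGetD A j 0 = 9 then c + 1 else c) count
      else count) 0

-- ===== PORT B =====
-- single pass: ones = 1s seen so far; on each 9 add ones to count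
def deneme1_alt (A : List Int) : Int :=
  (A.foldl
    (fun (st : Int × Int) x =>
      let st' := if x = 9 then (st.1, st.2 + st.1) else st
      if x = 1 then (st'.1 + 1, st'.2) else st')
    (0, 0)).2

-- ===== PRECONDITION & SPEC =====
def Spec_deneme1 (A : List Int) (out : Int) : Prop := out = deneme1_alt A
instance (A : List Int) (out : Int) : Decidable (Spec_deneme1 A out) := by unfold Spec_deneme1; infer_instance

-- ===== CLAIM (what is proved, stated in full; the proofs are below) =====
def Claim_equal_deneme1 : Prop := ∀ (A : List Int), Dom_deneme1 A → Spec_deneme1 A (deneme1 A)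

-- ===== LEMMAS AND PROOFS =====

/-- number of 9s, as an Int -/
def pvNines (l : List Int) : Int := (l.countP (fun x => x = 9) : Nat)

/-- reference value: sum over positions of a 1 of the 9s after it -/
def pvRef : List Int → Int
  | [] => 0
  | a :: l => (if a = 1 then pvNines l else 0) + pvRef l

theorem pvNines_cons (a : Int) (l : List Int) :
    pvNines (a :: l) = (if a = 9 then 1 else 0) + pvNines l := by
  rcases eq_or_ne a 9 with h | h
  · simp [pvNines, h]; ring
  · simp [pvNines, h]

/-- A's inner loop counts the 9s of the suffix. -/
theorem inner_count (l : List Int) (c : Int) :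
    l.foldl (fun c x => if x = 9 then c + 1 else c) c = c + pvNines l := by
  induction l generalizing c with
  | nil => simp [pvNines]
  | cons a l ih => simp only [List.foldl_cons, pvNines_cons, ih]; split_ifs <;> ring

theorem sum_ref (A : List Int) :
    ((List.range A.length).map
      (fun k => if A.getD k 0 = 1 then pvNines (A.drop (k + 1)) else 0)).sum = pvRef A := by
  induction A with
  | nil => simp [pvRef]
  | cons a l ih =>
    rw [pvRef, ← ih]
    rw [List.length_cons, List.range_succ_eq_map, List.map_cons, List.map_map, List.sum_cons]
    congr 1

theorem A_eq_ref (A : List Int) : deneme1 A = pvRef A := by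
  unfold deneme1
  rw [PySem.List.foldl_congr_mem
      (g := fun (count : Int) i =>
        count + (if PySem.List.pyGetD A i 0 = 1 then pvNines (A.drop (i + 1).toNat) else 0))]
  · rw [PySem.List.foldl_add, ← sum_ref A]
    rw [PySem.List.pyRange_zero_nat]
    simp only [List.map_map, zero_add]
    congr 1
    apply List.map_congr_left
    intro k _
    simp [PySem.List.pyGetD_natCast]
  · intro acc i hi
    have h0 : (0 : Int) ≤ i := (PySem.List.mem_pyRange_one.mp hi).1
    split_ifs with h1
    · rw [PySem.List.foldl_pyRange_pyGetD' A 0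
        (fun c x => if x = 9 then c + 1 else c) acc (by omega : (0:Int) ≤ i + 1)]
      rw [inner_count]
    · simp

/-- invariant of B's single pass -/
theorem B_inv (l : List Int) (ones cnt : Int) :
    (l.foldl
      (fun (st : Int × Int) x =>
        let st' := if x = 9 then (st.1, st.2 + st.1) else st
        if x = 1 then (st'.1 + 1, st'.2) else st')
      (ones, cnt)).2 = cnt + ones * pvNines l + pvRef l := by
  induction l generalizing ones cnt with
  | nil => simp [pvNines, pvRef]
  | cons a l ih =>
    simp only [List.foldl_cons, pvNines_cons, pvRef]
    split_ifs with h9 h1 h1 <;> simp [ih] <;> ring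

-- ===== VERDICT (by name: the statement is the Claim_ definition above) =====
theorem deneme1_spec : Claim_equal_deneme1 := by
  intro A _
  show deneme1 A = deneme1_alt A
  rw [A_eq_ref, deneme1_alt, B_inv]
  ring
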